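-- pv_equiv track=rewrite | github.com/ShiningLab/LexSubPrompt | src/models.py | lm2lexsub
-- ===== SOURCE A (Python) =====
-- def lm2lexsub(sents):
--     subs = []
--     for s in sents:
--         try:
--             sub = s.split('"')[-2]
--         except:
--             sub = ''
--         subs.append(sub)
--     return subs
-- ===== SOURCE B (Python) =====
-- def lm2lexsub(sents):
--     # Single reverse scan per sentence: collect the characters strictly between
--     # the last quote and the one before it (or the start), no split list built.
--     res = []
--     for s in sents:
--         buf = []
--         seen = False
--         for ch in reversed(s):
--             if ch == '"':
--                 if seen:
--                     break
--                 seen = True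
--             elif seen:
--                 buf.append(ch)
--         res.append(''.join(reversed(buf)) if seen else '')
--     return res
-- ===== Notes on version B (the rewrite author's own statement) =====
-- stated objective: alternative
-- what changed: Replaces split-on-quote-and-index-[-2] with a single reverse character scan per sentence that collects only the characters between the last two quotes (state machine, no split list built).
import Mathlib
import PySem

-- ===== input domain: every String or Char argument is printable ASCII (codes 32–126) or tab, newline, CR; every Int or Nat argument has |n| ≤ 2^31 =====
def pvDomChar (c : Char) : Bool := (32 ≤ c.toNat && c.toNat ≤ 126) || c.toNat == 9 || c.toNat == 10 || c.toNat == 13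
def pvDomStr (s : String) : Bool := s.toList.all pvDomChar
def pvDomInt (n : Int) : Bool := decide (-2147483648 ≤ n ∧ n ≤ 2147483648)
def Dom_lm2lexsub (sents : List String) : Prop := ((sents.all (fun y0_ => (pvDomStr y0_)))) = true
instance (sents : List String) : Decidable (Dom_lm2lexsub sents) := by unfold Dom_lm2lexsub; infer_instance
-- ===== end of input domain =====

-- B replaces split-on-'"'-and-index-[-2] by a single reverse character scan collecting the
-- characters between the last two quotes (alternative decomposition, no split list built).


-- ===== PORT A =====
-- sub = s.split('"')[-2], with the try/except returning '' when the indexing raises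
def aSub (s : String) : String :=
  match PySem.Str.split? s "\"" with
  | some parts =>
    match PySem.List.pyGet? parts (-2) with
    | some sub => sub
    | none => ""
  | none => ""

def lm2lexsub (sents : List String) : List String :=
  sents.foldl (fun subs s => subs ++ [aSub s]) []

-- ===== PORT B =====
-- the inner 'for ch in reversed(s)' loop: state (seen, buf); stops at the second quote
def altGo : List Char → Bool → List Char → Bool × List Char
  | [], seen, buf => (seen, buf)
  | c :: rest, seen, buf =>
    if c = '"' then
      if seen then (seen, buf) else altGo rest true buf
    else if seen then altGo rest seen (buf ++ [c]) else altGo rest seen buf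

def altSub (s : String) : String :=
  let r := altGo s.toList.reverse false []
  if r.1 then String.ofList r.2.reverse else ""

def lm2lexsub_alt (sents : List String) : List String :=
  sents.foldl (fun res s => res ++ [altSub s]) []

-- ===== PRECONDITION & SPEC =====
def Spec_lm2lexsub (sents : List String) (out : List String) : Prop := out = lm2lexsub_alt sents
instance (sents : List String) (out : List String) : Decidable (Spec_lm2lexsub sents out) := by unfold Spec_lm2lexsub; infer_instance

-- ===== CLAIM (what is proved, stated in full; the proofs are below) =====
def Claim_equal_lm2lexsub : Prop := ∀ (sents : List String), Dom_lm2lexsub sents → Spec_lm2lexsub sents (lm2lexsub sents)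

-- ===== LEMMAS AND PROOFS =====

-- fuel-free restatement of PySem.Chars.splitOn.go at sep = ['"']
def sp : List Char → List Char → List (List Char) → List (List Char)
  | [], cur, acc => (cur.reverse :: acc).reverse
  | c :: rest, cur, acc =>
    if c = '"' then sp rest [] (cur.reverse :: acc) else sp rest (c :: cur) acc

theorem go_eq_sp (fuel : Nat) (l cur : List Char) (acc : List (List Char))
    (h : l.length ≤ fuel) : PySem.Chars.splitOn.go ['"'] fuel l cur acc = sp l cur acc := by
  induction fuel generalizing l cur acc with
  | zero =>
    cases l with
    | nil => simp [PySem.Chars.splitOn.go, sp]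
    | cons c rest => simp at h
  | succ n ih =>
    cases l with
    | nil => simp [PySem.Chars.splitOn.go, sp]
    | cons c rest =>
      simp only [PySem.Chars.splitOn.go, sp, List.isPrefixOf]
      by_cases hc : c = '"'
      · simp [hc, ih rest [] _ (by simpa using h)]
      · simp [Ne.symm hc, hc, ih rest _ _ (by simpa using h)]

theorem splitOn_eq_sp (cs : List Char) : PySem.Chars.splitOn cs ['"'] = sp cs [] [] := by
  rw [PySem.Chars.splitOn]
  exact go_eq_sp (cs.length + 1) cs [] [] (by omega)

theorem sp_no_quote (l : List Char) (h : '"' ∉ l) (cur : List Char) (acc : List (List Char)) :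
    sp l cur acc = acc.reverse ++ [cur.reverse ++ l] := by
  induction l generalizing cur with
  | nil => simp [sp]
  | cons c rest ih =>
    have hc : c ≠ '"' := fun hc => h (hc ▸ List.mem_cons_self)
    simp [sp, hc, ih (fun hm => h (List.mem_cons_of_mem _ hm))]

-- sp with nonempty acc splits off acc.reverse
theorem sp_acc (l cur : List Char) (acc : List (List Char)) :
    sp l cur acc = acc.reverse ++ sp l cur [] := by
  induction l generalizing cur acc with
  | nil => simp [sp]
  | cons c rest ih =>
    by_cases hc : c = '"'
    · simp only [sp, if_pos hc]
      rw [ih [] (cur.reverse :: acc), ih [] [cur.reverse]]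
      simp
    · simp only [sp, if_neg hc]
      exact ih (c :: cur) acc

theorem sp_append_quote (xs ys cur : List Char) (acc : List (List Char)) :
    sp (xs ++ '"' :: ys) cur acc = sp xs cur acc ++ sp ys [] [] := by
  induction xs generalizing cur acc with
  | nil =>
    simp only [List.nil_append, sp]
    rw [sp_acc ys [] (cur.reverse :: acc)]
    simp
  | cons c rest ih =>
    by_cases hc : c = '"' <;> simp [sp, hc, ih]

theorem takeWhile_no_quote (u v : List Char) (h : '"' ∉ u) :
    (u ++ '"' :: v).takeWhile (fun c => c != '"') = u := by
  induction u with
  | nil => simp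
  | cons c rest ih =>
    have hc : c ≠ '"' := fun hc => h (hc ▸ List.mem_cons_self)
    simp [hc, ih (fun hm => h (List.mem_cons_of_mem _ hm))]

theorem exists_last_quote (cs : List Char) (h : '"' ∈ cs) :
    ∃ pre suf, cs = pre ++ '"' :: suf ∧ '"' ∉ suf := by
  induction cs with
  | nil => simp at h
  | cons c rest ih =>
    by_cases hr : '"' ∈ rest
    · obtain ⟨pre, suf, he, hn⟩ := ih hr
      exact ⟨c :: pre, suf, by simp [he], hn⟩
    · have hc : c = '"' := by
        rcases List.mem_cons.mp h with h' | h'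
        · exact h'.symm
        · exact absurd h' hr
      exact ⟨[], rest, by simp [hc], hr⟩

theorem sp_getLast (pre : List Char) :
    (sp pre [] []).getLast? = some ((pre.reverse.takeWhile (fun c => c != '"')).reverse) := by
  by_cases hq : '"' ∈ pre
  · obtain ⟨p2, tl, he, hn⟩ := exists_last_quote pre hq
    rw [he, sp_append_quote, sp_no_quote tl hn]
    simp only [List.reverse_nil, List.nil_append, List.getLast?_concat]
    rw [show (p2 ++ '"' :: tl).reverse = tl.reverse ++ '"' :: p2.reverse by simp]
    rw [takeWhile_no_quote _ _ (by simpa using hn)]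
    simp
  · rw [sp_no_quote pre hq]
    have ht : pre.reverse.takeWhile (fun c => c != '"') = pre.reverse := by
      rw [List.takeWhile_eq_self_iff]
      intro a ha
      have hm : a ∈ pre := List.mem_reverse.mp ha
      simp only [bne_iff_ne, ne_eq]
      intro he'
      exact hq (he' ▸ hm)
    simp [ht]

theorem pyGet?_concat_neg2 {α : Type} (P : List α) (x : α) :
    PySem.List.pyGet? (P ++ [x]) (-2) = P.getLast? := by
  cases P with
  | nil => simp [PySem.List.pyGet?, PySem.List.pyIdx?]
  | cons a P' =>
    simp only [PySem.List.pyGet?, PySem.List.pyIdx?, List.length_append, List.length_cons,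
      List.length_nil]
    have h0 : ¬ (0 : Int) ≤ -2 := by omega
    have h1 : -((P'.length + 1 + 1 : Nat) : Int) ≤ -2 := by push_cast; omega
    rw [if_neg h0, if_pos h1]
    have hk : (P'.length + 1 + 1) - (Int.toNat (-(-2))) = P'.length := by omega
    simp only [Option.bind_some, hk]
    rw [List.getLast?_eq_getElem?]
    have hg : (a :: P' ++ [x])[P'.length]? = (a :: P')[P'.length]? := by
      rw [List.getElem?_append_left (by simp)]
    simpa using hg

theorem pyGet?_map {α β : Type} (xs : List α) (f : α → β) (i : Int) :
    PySem.List.pyGet? (xs.map f) i = (PySem.List.pyGet? xs i).map f := by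
  simp only [PySem.List.pyGet?, List.length_map]
  cases PySem.List.pyIdx? xs.length i <;> simp

-- B-side loop lemmas
theorem altGo_skip (u rest buf : List Char) (h : '"' ∉ u) :
    altGo (u ++ rest) false buf = altGo rest false buf := by
  induction u with
  | nil => rfl
  | cons c t ih =>
    have hc : c ≠ '"' := fun hc => h (hc ▸ List.mem_cons_self)
    simp [altGo, hc, ih (fun hm => h (List.mem_cons_of_mem _ hm))]

theorem altGo_seen (v buf : List Char) :
    altGo v true buf = (true, buf ++ v.takeWhile (fun c => c != '"')) := by
  induction v generalizing buf with
  | nil => simp [altGo]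
  | cons c t ih =>
    by_cases hc : c = '"'
    · simp [altGo, hc]
    · have hb : (c != '"') = true := by simp [hc]
      simp [altGo, hc, ih, hb]

-- per-string equivalence
theorem sub_eq (s : String) : aSub s = altSub s := by
  have hql : ("\"" : String).toList = ['"'] := rfl
  by_cases h : '"' ∈ s.toList
  · obtain ⟨pre, suf, he, hn⟩ := exists_last_quote _ h
    have ha : aSub s = String.ofList ((pre.reverse.takeWhile (fun c => c != '"')).reverse) := by
      have h1 : PySem.Str.split? s "\"" = some ((sp pre [] [] ++ [suf]).map String.ofList) := by
        simp only [PySem.Str.split?, PySem.Chars.split?, hql, List.isEmpty_cons,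
          Bool.false_eq_true, if_false, splitOn_eq_sp, Option.map_some]
        rw [he, sp_append_quote, sp_no_quote suf hn]
        simp
      simp only [aSub, h1, pyGet?_map, pyGet?_concat_neg2, sp_getLast, Option.map_some]
    have hb : altSub s = String.ofList ((pre.reverse.takeWhile (fun c => c != '"')).reverse) := by
      have hr : s.toList.reverse = suf.reverse ++ '"' :: pre.reverse := by rw [he]; simp
      unfold altSub
      rw [hr, altGo_skip _ _ _ (by simpa using hn)]
      simp [altGo, altGo_seen]
    rw [ha, hb]
  · have ha : aSub s = "" := by
      have h1 : PySem.Str.split? s "\"" = some (([] ++ [s.toList]).map String.ofList) := by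
        simp only [PySem.Str.split?, PySem.Chars.split?, hql, List.isEmpty_cons,
          Bool.false_eq_true, if_false, splitOn_eq_sp, Option.map_some]
        rw [sp_no_quote _ h]
        simp
      simp only [aSub, h1, pyGet?_map, pyGet?_concat_neg2]
      simp
    have hb : altSub s = "" := by
      have hsk := altGo_skip s.toList.reverse [] [] (by simpa using h)
      rw [List.append_nil] at hsk
      simp [altSub, hsk, altGo]
    rw [ha, hb]

-- ===== VERDICT (by name: the statement is the Claim_ definition above) =====
theorem lm2lexsub_spec : Claim_equal_lm2lexsub := by
  intro sents _
  show lm2lexsub sents = lm2lexsub_alt sents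
  simp [lm2lexsub, lm2lexsub_alt, sub_eq]
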